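-- pv_equiv track=rewrite | github.com/Ragnyll/coding_problems | python/is_decomposable.py | isDecomposable
-- ===== SOURCE A (Python) =====
-- def isDecomposable(s: str) -> bool:
--     def is_3_equals(s: str):
--         sub = s[0:3]
--         return len(set(sub)) == 1
--
--     def is_2_equals(sub: str):
--         sub = s[0:2]
--         return len(set(sub)) == 1
--
--     if len(s) < 2:
--         return False
--
--     substring_2_used = False
--     while s:
--         if len(s) >= 3 and is_3_equals(s):
--             # remove first 3 chars of string
--             s = s[3:]
--
--
--         elif is_2_equals(s):
--             # make sure the substring 2 hasnt been used yet
--             if substring_2_used: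
--                 return False
--
--             # remove first 2 chars of string
--             substring_2_used = True
--             s = s[2:]
--         else:
--             # it doesnt work, thus it cant be decomposed
--             return False
--     return True and substring_2_used
-- ===== SOURCE B (Python) =====
-- def isDecomposable(s: str) -> bool:
--     """True iff s splits into blocks of 3 equal characters plus exactly one
--     block of 2 equal characters: count each maximal run of equal characters;
--     exactly one run may be non-multiple of 3 and it must leave a pair."""
--     rems = []
--     run = 0
--     prev = None
--     for ch in s:
--         if ch == prev:
--             run += 1
--         else:
--             if run % 3:
--                 rems.append(run % 3)
--             prev, run = ch, 1
--     if run % 3: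
--         rems.append(run % 3)
--     return rems == [2]
-- ===== Notes on version B (the rewrite author's own statement) =====
-- stated objective: alternative
-- what changed: Replaces the greedy block-consumption while-loop (with a used-the-2-block flag) by a single run-length pass collecting run lengths modulo 3 and checking that the nonzero remainders are exactly [2].
-- intended difference: On strings of length >= 2 whose final maximal run has length = 1 mod 3 while every other run length is divisible by 3 (e.g. 'aaaa'), A returns True because its 2-block test accidentally accepts a single leftover character (s[0:2] of a 1-char string); B returns False, since a lone character is not a block of 2 equal characters, which is the intended behaviour. — e.g. on isDecomposable("aaaa"): A returns true, B returns false
import Mathlib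
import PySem

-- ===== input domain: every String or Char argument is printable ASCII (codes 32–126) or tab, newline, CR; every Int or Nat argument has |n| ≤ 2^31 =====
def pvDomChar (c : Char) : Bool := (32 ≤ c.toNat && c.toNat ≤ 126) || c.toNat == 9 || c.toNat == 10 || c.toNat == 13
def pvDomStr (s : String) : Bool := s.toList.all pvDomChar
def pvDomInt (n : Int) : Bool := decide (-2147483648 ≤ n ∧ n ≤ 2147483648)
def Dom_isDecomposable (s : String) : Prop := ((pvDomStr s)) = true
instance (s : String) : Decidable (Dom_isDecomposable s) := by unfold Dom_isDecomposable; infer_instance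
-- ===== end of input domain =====

-- B replaces A's greedy block-consumption loop by one run-length pass that
-- collects run lengths mod 3 and checks the nonzero remainders are exactly [2]
-- (objective: alternative). On strings whose final run has length ≡ 1 (mod 3)
-- and all other runs divisible by 3, A accidentally returns true; B returns false.


-- ===== PORT A =====
-- A's while loop: the local variable s (a list of chars here) shrinks by 3 or 2
-- per iteration; the two `len(set(...)) == 1` tests are ported with PySem.Set.
def pvLoopA (l : List Char) (used : Bool) : Bool :=
  if _h : l = [] then used
  else if 3 ≤ l.length ∧ (PySem.Set.ofList (l.take 3)).length = 1 then
    pvLoopA (l.drop 3) used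
  else if (PySem.Set.ofList (l.take 2)).length = 1 then
    if used then false else pvLoopA (l.drop 2) true
  else false
termination_by l.length
decreasing_by
  · have : l.length ≠ 0 := by simpa [List.length_eq_zero_iff] using _h
    simp only [List.length_drop]
    omega
  · have : l.length ≠ 0 := by simpa [List.length_eq_zero_iff] using _h
    simp only [List.length_drop]
    omega

def isDecomposable (s : String) : Bool :=
  if s.toList.length < 2 then false else pvLoopA s.toList false

-- ===== PORT B =====
-- B's for-loop body: state is (rems, run, prev) exactly as in Source B
def pvStepB (st : List Nat × Nat × Option Char) (ch : Char) : List Nat × Nat × Option Char :=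
  match st with
  | (rems, run, prev) =>
    if some ch = prev then (rems, run + 1, prev)
    else ((if run % 3 ≠ 0 then rems ++ [run % 3] else rems), 1, some ch)

def isDecomposable_alt (s : String) : Bool :=
  match s.toList.foldl pvStepB ([], 0, none) with
  | (rems, run, _) =>
    (if run % 3 ≠ 0 then rems ++ [run % 3] else rems) == [2]

-- ===== PRECONDITION & SPEC =====
-- does the list split into consecutive blocks of 3 equal characters?
def pvTrip : List Char → Bool
  | [] => true
  | a :: b :: c :: t => a == b && b == c && pvTrip t
  | _ => false

-- On strings of length ≥ 2 whose prefix excluding the last character splits into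
-- blocks of 3 equal characters (i.e. the final maximal run has length ≡ 1 mod 3
-- and every other run length is divisible by 3, e.g. "aaaa"), A returns true
-- because its 2-block test accidentally accepts the single leftover character;
-- B returns false, since a lone character is not a block of 2 equal characters,
-- which is the intended behaviour.
def D_isDecomposable (s : String) : Prop :=
  2 ≤ s.toList.length ∧ pvTrip s.toList.dropLast = true
instance (s : String) : Decidable (D_isDecomposable s) := by unfold D_isDecomposable; infer_instance

def Spec_isDecomposable (s : String) (out : Bool) : Prop := ¬ D_isDecomposable s → out = isDecomposable_alt s
instance (s : String) (out : Bool) : Decidable (Spec_isDecomposable s out) := by unfold Spec_isDecomposable; infer_instance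

def pvDiffWitness_isDecomposable : String := "aaaa"
def pvDiffWitnessOut_isDecomposable : Bool × Bool := (true, false)

-- ===== CLAIM (what is proved, stated in full; the proofs are below) =====
def Claim_unchanged_isDecomposable : Prop := ∀ (s : String), Dom_isDecomposable s → Spec_isDecomposable s (isDecomposable s)
def Claim_changed_isDecomposable : Prop := Dom_isDecomposable (pvDiffWitness_isDecomposable) ∧ D_isDecomposable (pvDiffWitness_isDecomposable) ∧ isDecomposable (pvDiffWitness_isDecomposable) = pvDiffWitnessOut_isDecomposable.1 ∧ isDecomposable_alt (pvDiffWitness_isDecomposable) = pvDiffWitnessOut_isDecomposable.2 ∧ pvDiffWitnessOut_isDecomposable.1 ≠ pvDiffWitnessOut_isDecomposable.2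
def Claim_exact_isDecomposable : Prop := ∀ (s : String), Dom_isDecomposable s → D_isDecomposable s → isDecomposable s ≠ isDecomposable_alt s

-- ===== LEMMAS AND PROOFS =====

-- run-length table of the input: counts of maximal runs of equal characters
def pvCountLead (c : Char) : List Char → Nat
  | [] => 0
  | x :: t => if x = c then pvCountLead c t + 1 else 0

def pvRuns : List Char → List Nat
  | [] => []
  | c :: t => (pvCountLead c t + 1) :: pvRuns (t.drop (pvCountLead c t))
termination_by l => l.length
decreasing_by
  simp only [List.length_drop, List.length_cons]
  omega

-- final run length ≡ 1 (mod 3), every earlier run length ≡ 0 (mod 3)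
def pvDcond : List Nat → Bool
  | [] => false
  | [k] => k % 3 == 1
  | k :: t => (k % 3 == 0) && pvDcond t

-- all run lengths divisible by 3
def pvAllZero (rs : List Nat) : Bool := rs.all (fun k => k % 3 == 0)

-- characterisation of A's greedy loop on the run-length table (used = false)
def pvGood : List Nat → Bool
  | [] => false
  | k :: t => if k % 3 = 0 then pvGood t else if k % 3 = 2 then pvAllZero t else decide (t = [])

-- nonzero remainders of the run lengths (what B's rems list ends up holding)
def pvBad (rs : List Nat) : List Nat := (rs.map (· % 3)).filter (fun r => r != 0)

-- finalisation of B's loop state (the post-loop append + comparison source)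
def pvFin (st : List Nat × Nat × Option Char) : List Nat :=
  match st with
  | (rems, run, _) => if run % 3 ≠ 0 then rems ++ [run % 3] else rems

theorem setlen1_of_two_mem {x y : Char} {xs : List Char} (hx : x ∈ xs) (hy : y ∈ xs)
    (hxy : x ≠ y) : (PySem.Set.ofList xs).length ≠ 1 := by
  intro h1
  obtain ⟨a, ha⟩ := List.length_eq_one_iff.mp h1
  have hx' : x ∈ PySem.Set.ofList xs := (PySem.Set.mem_ofList _ _).mpr hx
  have hy' : y ∈ PySem.Set.ofList xs := (PySem.Set.mem_ofList _ _).mpr hy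
  rw [ha] at hx' hy'
  simp at hx' hy'
  exact hxy (hx'.trans hy'.symm)

theorem foldl_add_const (x : Char) (w : List Char) (h : ∀ z ∈ w, z = x) :
    w.foldl PySem.Set.add [x] = [x] := by
  induction w with
  | nil => rfl
  | cons z t ih =>
    have hz : z = x := h z (by simp)
    have hadd : PySem.Set.add [x] z = [x] := by
      simp [PySem.Set.add, PySem.Set.contains, hz]
    simp only [List.foldl_cons, hadd]
    exact ih (fun y hy => h y (by simp [hy]))

theorem setlen1_all_eq (x : Char) (w : List Char) (h : ∀ z ∈ w, z = x) :
    (PySem.Set.ofList (x :: w)).length = 1 := by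
  have hof : PySem.Set.ofList (x :: w) = [x] := by
    show (x :: w).foldl PySem.Set.add [] = [x]
    simp only [List.foldl_cons]
    have hadd : PySem.Set.add [] x = [x] := by
      simp [PySem.Set.add, PySem.Set.contains]
    rw [hadd]
    exact foldl_add_const x w h
  simp [hof]

theorem pvLoopA_nil (used : Bool) : pvLoopA [] used = used := by
  rw [pvLoopA]
  simp

theorem pvLoopA_step3 (c : Char) (t : List Char) (used : Bool) :
    pvLoopA (c :: c :: c :: t) used = pvLoopA t used := by
  rw [pvLoopA, dif_neg (by simp), if_pos]
  · simp
  · refine ⟨by simp, ?_⟩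
    have := setlen1_all_eq c [c, c] (by simp)
    simpa [List.take] using this

-- A's loop on one maximal run of length k followed by rest (rest not starting with c)
theorem pvLoopA_run (k : Nat) (c : Char) (rest : List Char)
    (h : rest.head? ≠ some c) (used : Bool) :
    pvLoopA (List.replicate k c ++ rest) used =
      if k % 3 = 0 then pvLoopA rest used
      else if k % 3 = 2 then (if used then false else pvLoopA rest true)
      else (if rest.isEmpty then !used else false) := by
  induction k using Nat.strong_induction_on with
  | _ k ih =>
    match k with
    | 0 => simp
    | 1 =>
      simp only [List.replicate, List.singleton_append]
      match rest with
      | [] =>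
        rw [pvLoopA, dif_neg (by simp), if_neg (by simp), if_pos]
        · simp [pvLoopA_nil]
        · have := setlen1_all_eq c [] (by simp)
          simpa [List.take] using this
      | d :: t =>
        have hdc : d ≠ c := by simpa using h
        rw [pvLoopA, dif_neg (by simp), if_neg, if_neg]
        · simp
        · have := setlen1_of_two_mem (x := c) (y := d) (xs := (c :: d :: t).take 2)
            (by simp [List.take]) (by simp [List.take]) (Ne.symm hdc)
          simpa using this
        · rintro ⟨-, hlen⟩
          exact setlen1_of_two_mem (x := c) (y := d) (by simp [List.take])
            (by simp [List.take]) (Ne.symm hdc) hlen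
    | 2 =>
      simp only [List.replicate, List.nil_append, List.cons_append]
      match rest with
      | [] =>
        rw [pvLoopA, dif_neg (by simp), if_neg (by simp), if_pos]
        · simp [pvLoopA_nil]
        · have := setlen1_all_eq c [c] (by simp)
          simpa [List.take] using this
      | d :: t =>
        have hdc : d ≠ c := by simpa using h
        rw [pvLoopA, dif_neg (by simp), if_neg, if_pos]
        · simp
        · have := setlen1_all_eq c [c] (by simp)
          simpa [List.take] using this
        · rintro ⟨-, hlen⟩
          exact setlen1_of_two_mem (x := c) (y := d) (by simp [List.take])
            (by simp [List.take]) (Ne.symm hdc) hlen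
    | (m+3) =>
      have hrep : List.replicate (m+3) c ++ rest
          = c :: c :: c :: (List.replicate m c ++ rest) := by
        simp [List.replicate_succ]
      rw [hrep, pvLoopA_step3, ih m (by omega)]
      have hm : (m + 3) % 3 = m % 3 := by omega
      rw [hm]

theorem replicate_countLead_append (c : Char) (t : List Char) :
    List.replicate (pvCountLead c t + 1) c ++ t.drop (pvCountLead c t) = c :: t := by
  induction t with
  | nil => simp [pvCountLead]
  | cons x t' ih =>
    by_cases hx : x = c
    · subst hx
      rw [pvCountLead, if_pos rfl]
      have hrep : List.replicate (pvCountLead x t' + 1 + 1) x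
          = x :: List.replicate (pvCountLead x t' + 1) x := by
        simp [List.replicate_succ]
      rw [hrep]
      simp only [List.cons_append, List.drop_succ_cons]
      rw [ih]
    · simp [pvCountLead, hx]

theorem head_drop_countLead (c : Char) (t : List Char) :
    (t.drop (pvCountLead c t)).head? ≠ some c := by
  induction t with
  | nil => simp
  | cons x t' ih =>
    by_cases hx : x = c
    · subst hx
      simpa [pvCountLead] using ih
    · simp only [pvCountLead, if_neg hx, List.drop_zero, List.head?_cons]
      intro hh
      exact hx (by injection hh)

theorem pvRuns_nil : pvRuns [] = [] := by
  rw [pvRuns.eq_def]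

theorem pvRuns_cons (c : Char) (t : List Char) :
    pvRuns (c :: t) = (pvCountLead c t + 1) :: pvRuns (t.drop (pvCountLead c t)) := by
  rw [pvRuns.eq_def]

theorem pvLoopA_true (l : List Char) : pvLoopA l true = pvAllZero (pvRuns l) := by
  match l with
  | [] => simp [pvLoopA_nil, pvRuns_nil, pvAllZero]
  | c :: t =>
    have hk := replicate_countLead_append c t
    have hh := head_drop_countLead c t
    have ih := pvLoopA_true (t.drop (pvCountLead c t))
    rw [pvRuns_cons, ← hk, pvLoopA_run (pvCountLead c t + 1) c _ hh]
    have h3 : (pvCountLead c t + 1) % 3 = 0 ∨ (pvCountLead c t + 1) % 3 = 1 ∨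
        (pvCountLead c t + 1) % 3 = 2 := by omega
    rcases h3 with h3 | h3 | h3 <;> simp [h3, pvAllZero, ih]
termination_by l.length
decreasing_by
  simp only [List.length_drop, List.length_cons]
  omega

theorem pvRuns_eq_nil_iff (l : List Char) : (pvRuns l = []) ↔ l = [] := by
  match l with
  | [] => simp [pvRuns_nil]
  | c :: t => simp [pvRuns_cons]

theorem pvLoopA_false (l : List Char) : pvLoopA l false = pvGood (pvRuns l) := by
  match l with
  | [] => simp [pvLoopA_nil, pvRuns_nil, pvGood]
  | c :: t =>
    have hk := replicate_countLead_append c t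
    have hh := head_drop_countLead c t
    have ih := pvLoopA_false (t.drop (pvCountLead c t))
    rw [pvRuns_cons, ← hk, pvLoopA_run (pvCountLead c t + 1) c _ hh]
    have h3 : (pvCountLead c t + 1) % 3 = 0 ∨ (pvCountLead c t + 1) % 3 = 1 ∨
        (pvCountLead c t + 1) % 3 = 2 := by omega
    rcases h3 with h3 | h3 | h3
    · simp [h3, pvGood, ih]
    · simp [h3, pvGood, List.isEmpty_iff, pvRuns_eq_nil_iff]
    · simp [h3, pvGood, pvLoopA_true]
termination_by l.length
decreasing_by
  simp only [List.length_drop, List.length_cons]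
  omega

theorem pvBad_nil : pvBad [] = [] := rfl

theorem pvBad_cons (a : Nat) (rs : List Nat) :
    pvBad (a :: rs) = (if a % 3 ≠ 0 then [a % 3] else []) ++ pvBad rs := by
  by_cases h : a % 3 = 0 <;> simp [pvBad, h]

theorem pvBad_eq_nil_iff (t : List Nat) : (pvBad t = []) ↔ pvAllZero t = true := by
  simp [pvBad, pvAllZero, List.filter_eq_nil_iff]

-- B's loop only increments run while the next chars equal prev
theorem foldB_const (w : List Char) (c : Char) (h : ∀ z ∈ w, z = c)
    (rems : List Nat) (run : Nat) :
    List.foldl pvStepB (rems, run, some c) w = (rems, run + w.length, some c) := by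
  induction w generalizing run with
  | nil => simp
  | cons z t ih =>
    have hz : z = c := h z (by simp)
    have hstep : pvStepB (rems, run, some c) z = (rems, run + 1, some c) := by
      simp [pvStepB, hz]
    simp only [List.foldl_cons, hstep]
    rw [ih (fun y hy => h y (by simp [hy]))]
    simp [List.length_cons]
    omega

-- B's loop over a string starting inside a run of c with count r so far
theorem foldB_main (t : List Char) (c : Char) (rems : List Nat) (r : Nat) :
    pvFin (List.foldl pvStepB (rems, r, some c) t)
      = rems ++ pvBad ((r + pvCountLead c t) :: pvRuns (t.drop (pvCountLead c t))) := by
  have hk := replicate_countLead_append c t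
  set k := pvCountLead c t with hkdef
  have hsplit : List.replicate k c ++ t.drop k = t := by
    have h2 : c :: (List.replicate k c ++ t.drop k) = c :: t := by
      simpa [List.replicate_succ] using hk
    have := congrArg List.tail h2
    simpa using this
  have hhd := head_drop_countLead c t
  conv_lhs => rw [← hsplit]
  rw [List.foldl_append,
    foldB_const (List.replicate k c) c (fun z hz => List.eq_of_mem_replicate hz) rems r,
    List.length_replicate]
  cases hrest : t.drop k with
  | nil =>
    simp only [List.foldl_nil, pvFin, pvBad_cons, pvRuns_nil, pvBad_nil]
    by_cases h : (r + k) % 3 = 0 <;> simp [h]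
  | cons d t' =>
    have hdc : d ≠ c := by
      rw [hrest] at hhd
      simpa using hhd
    have hstep0 : pvStepB (rems, r + k, some c) d
        = ((if (r + k) % 3 ≠ 0 then rems ++ [(r + k) % 3] else rems), 1, some d) := by
      simp [pvStepB, hdc]
    simp only [List.foldl_cons, hstep0]
    rw [foldB_main t' d _ 1]
    rw [pvBad_cons (r + k), pvRuns_cons]
    rw [show 1 + pvCountLead d t' = pvCountLead d t' + 1 from by omega]
    by_cases h : (r + k) % 3 = 0 <;> simp [h]
termination_by t.length
decreasing_by
  have hlen : (t.drop k).length = t.length - k := List.length_drop ..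
  rw [hrest] at hlen
  simp at hlen
  omega

-- B computes the nonzero remainders of the run lengths and compares with [2]
theorem alt_char (s : String) :
    isDecomposable_alt s = (pvBad (pvRuns s.toList) == [2]) := by
  cases hl : s.toList with
  | nil =>
    simp [isDecomposable_alt, hl, pvRuns_nil, pvBad_nil]
  | cons c t =>
    have hstep : pvStepB ([], 0, none) c = ([], 1, some c) := by
      simp [pvStepB]
    have hfin : isDecomposable_alt s
        = (pvFin (s.toList.foldl pvStepB ([], 0, none)) == [2]) := by
      unfold isDecomposable_alt pvFin
      rcases s.toList.foldl pvStepB ([], 0, none) with ⟨rems, run, prev⟩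
      rfl
    rw [hfin, hl]
    simp only [List.foldl_cons, hstep]
    rw [foldB_main t c [] 1, pvRuns_cons]
    simp [Nat.add_comm]

-- pvDcond structure: cases [] / [k] / k :: (nonempty)
theorem pvDcond_nil : pvDcond [] = false := rfl
theorem pvDcond_single (k : Nat) : pvDcond [k] = (k % 3 == 1) := rfl
theorem pvDcond_cons (k a : Nat) (t : List Nat) :
    pvDcond (k :: a :: t) = ((k % 3 == 0) && pvDcond (a :: t)) := rfl

-- the greedy verdict equals "bad list is [2]" except on the Dcond corner
theorem pvGood_eq (rs : List Nat) :
    pvGood rs = (decide (pvBad rs = [2]) || pvDcond rs) := by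
  induction rs with
  | nil => simp [pvGood, pvBad_nil, pvDcond_nil]
  | cons k t ih =>
    have h3 : k % 3 = 0 ∨ k % 3 = 1 ∨ k % 3 = 2 := by omega
    rcases h3 with h3 | h3 | h3
    · have hg : pvGood (k :: t) = pvGood t := by simp [pvGood, h3]
      rw [hg, ih, pvBad_cons, h3]
      cases t with
      | nil => simp [pvBad_nil, pvDcond_nil, pvDcond_single, h3]
      | cons a t' => simp [pvDcond_cons, h3]
    · have hg : pvGood (k :: t) = decide (t = []) := by simp [pvGood, h3]
      rw [hg, pvBad_cons, h3]
      cases t with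
      | nil => simp [pvBad_nil, pvDcond_single, h3]
      | cons a t' => simp [pvDcond_cons, h3]
    · have hg : pvGood (k :: t) = pvAllZero t := by simp [pvGood, h3]
      rw [hg, pvBad_cons, h3]
      cases t with
      | nil => simp [pvBad_nil, pvDcond_single, pvAllZero]
      | cons a t' =>
        by_cases hz : pvAllZero (a :: t') = true
        · have := (pvBad_eq_nil_iff (a :: t')).mpr hz
          simp [this, hz, pvDcond_cons, h3]
        · have hb : pvBad (a :: t') ≠ [] := by
            intro hc
            exact hz ((pvBad_eq_nil_iff (a :: t')).mp hc)
          have hz' : pvAllZero (a :: t') = false := eq_false_of_ne_true hz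
          rcases List.exists_cons_of_ne_nil hb with ⟨x, w, hw⟩
          simp [hz', pvDcond_cons, h3, hw]

-- inside the corner, the bad list is exactly [1]
theorem pvDcond_bad (rs : List Nat) (h : pvDcond rs = true) : pvBad rs = [1] := by
  induction rs with
  | nil => simp [pvDcond_nil] at h
  | cons k t ih =>
    cases t with
    | nil =>
      rw [pvDcond_single] at h
      have h1 : k % 3 = 1 := by simpa using h
      simp [pvBad_cons, h1, pvBad_nil]
    | cons a t' =>
      rw [pvDcond_cons] at h
      simp only [Bool.and_eq_true, beq_iff_eq] at h
      obtain ⟨h0, hrec⟩ := h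
      rw [pvBad_cons, h0]
      simp [ih hrec]

-- short strings: the bad list is [] or [1], never [2]
theorem short_bad (l : List Char) (h : l.length < 2) : pvBad (pvRuns l) ≠ [2] := by
  match l with
  | [] => simp [pvRuns_nil, pvBad_nil]
  | [c] =>
    rw [pvRuns_cons]
    simp [pvCountLead, pvRuns_nil, pvBad_cons, pvBad_nil]
  | a :: b :: t => simp at h


-- pvTrip over one maximal run followed by rest (rest not starting with c)
theorem pvTrip_run (m : Nat) (c : Char) (rest : List Char) (h : rest.head? ≠ some c) :
    pvTrip (List.replicate m c ++ rest) = (decide (m % 3 = 0) && pvTrip rest) := by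
  induction m using Nat.strong_induction_on with
  | _ m ih =>
    match m with
    | 0 => simp
    | 1 =>
      simp only [List.replicate, List.singleton_append]
      match rest with
      | [] => simp [pvTrip]
      | [d] => simp [pvTrip]
      | d :: e :: t =>
        have hdc : d ≠ c := by simpa using h
        simp [pvTrip, Ne.symm hdc]
    | 2 =>
      simp only [List.replicate, List.nil_append, List.cons_append]
      match rest with
      | [] => simp [pvTrip]
      | d :: t =>
        have hdc : d ≠ c := by simpa using h
        simp [pvTrip, Ne.symm hdc]
    | (m'+3) =>
      have hrep : List.replicate (m'+3) c ++ rest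
          = c :: c :: c :: (List.replicate m' c ++ rest) := by
        simp [List.replicate_succ]
      rw [hrep]
      simp only [pvTrip]
      rw [ih m' (by omega)]
      have hm : (m' + 3) % 3 = m' % 3 := by omega
      simp [hm]

-- D_'s condition, read on the run-length table
theorem pvTrip_dropLast (l : List Char) (hne : l ≠ []) :
    pvTrip l.dropLast = pvDcond (pvRuns l) := by
  match l with
  | c :: t =>
    have hk := replicate_countLead_append c t
    set k := pvCountLead c t with hkdef
    rw [pvRuns_cons]
    cases hrest : t.drop k with
    | nil =>
      have hl : c :: t = List.replicate (k + 1) c := by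
        rw [← hk, hrest, List.append_nil]
      have hdl : (List.replicate (k + 1) c).dropLast = List.replicate k c := by
        rw [List.replicate_succ']
        simp
      have htr := pvTrip_run k c [] (by simp)
      rw [List.append_nil] at htr
      rw [hl, hdl, htr, pvRuns_nil, ← hkdef]
      by_cases h0 : k % 3 = 0
      · have h1 : (k + 1) % 3 = 1 := by omega
        simp [pvTrip, pvDcond, h0, h1]
      · have h1 : (k + 1) % 3 ≠ 1 := by omega
        simp [pvTrip, pvDcond, h0, h1]
    | cons d t' =>
      have hhd := head_drop_countLead c t
      rw [hrest] at hhd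
      have hdc : d ≠ c := by simpa using hhd
      have hl : c :: t = List.replicate (k + 1) c ++ (d :: t') := by
        rw [← hk, hrest]
      have hdl : (List.replicate (k + 1) c ++ (d :: t')).dropLast
          = List.replicate (k + 1) c ++ (d :: t').dropLast := by
        rw [List.dropLast_append_cons]
      have hh2 : ((d :: t').dropLast).head? ≠ some c := by
        cases t' with
        | nil => simp
        | cons e u => simp [List.dropLast, hdc]
      rw [hl, hdl, pvTrip_run (k + 1) c _ hh2,
        pvTrip_dropLast (d :: t') (by simp)]
      rcases (List.exists_cons_of_ne_nil
        ((not_iff_not.mpr (pvRuns_eq_nil_iff (d :: t'))).mpr (by simp))) with ⟨a, w, hw⟩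
      rw [← hkdef, hw, pvDcond_cons]
      by_cases h0 : (k + 1) % 3 = 0 <;> simp [h0]
termination_by l.length
decreasing_by
  have hlen : (t.drop k).length ≤ t.length := by simp
  rw [hrest] at hlen
  simp only [List.length_cons] at hlen ⊢
  omega

theorem runs_aaaa : pvRuns "aaaa".toList = [4] := by
  rw [show "aaaa".toList = ['a','a','a','a'] from rfl, pvRuns_cons]
  norm_num [pvCountLead, pvRuns_nil]

-- ===== VERDICT (by name: the statement is the Claim_ definition above) =====
theorem isDecomposable_spec : Claim_unchanged_isDecomposable := by
  intro s _ hD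
  rw [alt_char]
  unfold isDecomposable
  by_cases h : s.toList.length < 2
  · rw [if_pos h]
    have := short_bad s.toList h
    simp [this]
  · have hne : s.toList ≠ [] := by
      intro hc
      rw [hc] at h
      simp at h
    rw [if_neg h, pvLoopA_false, pvGood_eq, ← pvTrip_dropLast _ hne]
    cases hcase : pvTrip s.toList.dropLast with
    | false =>
      by_cases hb : pvBad (pvRuns s.toList) = [2] <;> simp [hb]
    | true => exact absurd ⟨by omega, hcase⟩ hD

theorem isDecomposable_changed : Claim_changed_isDecomposable := by
  unfold Claim_changed_isDecomposable pvDiffWitness_isDecomposable pvDiffWitnessOut_isDecomposable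
  refine ⟨by decide, by decide, ?_, by decide, by decide⟩
  unfold isDecomposable
  rw [if_neg (by decide), pvLoopA_false, runs_aaaa]
  decide

theorem isDecomposable_tight : Claim_exact_isDecomposable := by
  intro s _ hD
  obtain ⟨hlen, hdc⟩ := hD
  have hne : s.toList ≠ [] := by
    intro hc
    rw [hc] at hlen
    simp at hlen
  have hd : pvDcond (pvRuns s.toList) = true := by
    rw [← pvTrip_dropLast _ hne]
    exact hdc
  rw [alt_char]
  unfold isDecomposable
  rw [if_neg (by omega), pvLoopA_false, pvGood_eq, hd, pvDcond_bad _ hd]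
  simp
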